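-- pv_equiv track=rewrite | github.com/SweetoCodes/Moogle-Translate | makingMoogleTranslate/create_moodictionary.py | number_to_moo
-- ===== SOURCE A (Python) =====
-- def number_to_moo(number, word=''):
--     if number > 1:
--         if number % 2 == 1:
--             word += 'm'
--         elif number % 2 == 0:
--             word += 'o'
--         return number_to_moo(number // 2, word)
--     else:
--         return word
-- ===== SOURCE B (Python) =====
-- def number_to_moo(number, word=''):
--     bits = []
--     while number > 1:
--         bits.append('m' if number % 2 == 1 else 'o')
--         number //= 2
--     return word + ''.join(bits)
-- ===== Notes on version B (the rewrite author's own statement) =====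
-- stated objective: idiomatic
-- what changed: Replaces tail recursion with a string accumulator rebuilt each step by an iterative loop that collects the digit characters in a list and joins them once at the end.
import Mathlib
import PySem

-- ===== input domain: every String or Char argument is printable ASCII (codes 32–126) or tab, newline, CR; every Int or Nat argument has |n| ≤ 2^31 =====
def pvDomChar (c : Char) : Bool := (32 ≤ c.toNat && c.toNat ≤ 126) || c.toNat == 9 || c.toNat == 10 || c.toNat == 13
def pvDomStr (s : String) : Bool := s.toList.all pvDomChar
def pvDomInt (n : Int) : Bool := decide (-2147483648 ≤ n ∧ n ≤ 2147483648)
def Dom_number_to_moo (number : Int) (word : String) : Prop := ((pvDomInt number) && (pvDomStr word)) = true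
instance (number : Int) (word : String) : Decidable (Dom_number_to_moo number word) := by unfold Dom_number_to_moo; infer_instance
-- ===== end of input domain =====

-- B: iterative loop collecting digit chars into a list joined once, instead of A's tail recursion rebuilding the string each step.
-- ===== PORT A =====
theorem pv_half_lt (n : Int) (h : n > 1) : (PySem.Int.floordiv n 2).toNat < n.toNat := by
  rw [PySem.Int.floordiv_eq_ediv_of_pos (by omega)]
  omega

def number_to_moo (number : Int) (word : String) : String :=
  if number > 1 then
    number_to_moo (PySem.Int.floordiv number 2)
      (if PySem.Int.mod number 2 = 1 then word ++ "m"
       else if PySem.Int.mod number 2 = 0 then word ++ "o"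
       else word)
  else word
termination_by number.toNat
decreasing_by exact pv_half_lt number (by assumption)

-- ===== PORT B =====
def mooGo (number : Int) (bits : List String) : List String :=
  if number > 1 then
    mooGo (PySem.Int.floordiv number 2)
      (bits ++ [if PySem.Int.mod number 2 = 1 then "m" else "o"])
  else bits
termination_by number.toNat
decreasing_by exact pv_half_lt number (by assumption)

def number_to_moo_alt (number : Int) (word : String) : String :=
  word ++ PySem.Str.join "" (mooGo number [])

-- ===== PRECONDITION & SPEC =====
def Spec_number_to_moo (number : Int) (word : String) (out : String) : Prop := out = number_to_moo_alt number word
instance (number : Int) (word : String) (out : String) : Decidable (Spec_number_to_moo number word out) := by unfold Spec_number_to_moo; infer_instance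

-- ===== CLAIM (what is proved, stated in full; the proofs are below) =====
def Claim_equal_number_to_moo : Prop := ∀ (number : Int) (word : String), Dom_number_to_moo number word → Spec_number_to_moo number word (number_to_moo number word)

-- ===== LEMMAS AND PROOFS =====

theorem join_nil_flatten (L : List (List Char)) : PySem.Chars.join [] L = L.flatten := by
  simp [PySem.Chars.join, List.intercalate]
  induction L with
  | nil => simp
  | cons a l ih => cases l <;> simp_all [List.intersperse]

theorem mooGo_stop (n : Int) (bits : List String) (h : ¬ n > 1) : mooGo n bits = bits := by
  rw [mooGo]; simp [h]

theorem mooGo_shift (k : Nat) : ∀ (n : Int), n.toNat ≤ k → ∀ (bits : List String),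
    mooGo n bits = bits ++ mooGo n [] := by
  induction k with
  | zero =>
    intro n hn bits
    rw [mooGo_stop _ _ (by omega), mooGo_stop _ _ (by omega)]
    simp
  | succ k ih =>
    intro n hn bits
    by_cases h : n > 1
    · have hb : (PySem.Int.floordiv n 2).toNat ≤ k := by
        have := pv_half_lt n h; omega
      conv_lhs => rw [mooGo]
      conv_rhs => rw [mooGo]
      simp only [h, if_pos]
      rw [ih _ hb, ih _ hb ([] ++ [_])]
      simp
    · rw [mooGo_stop _ _ h, mooGo_stop _ _ h]; simp

theorem moo_eq_toList (k : Nat) : ∀ (n : Int), n.toNat ≤ k → ∀ (w : String),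
    (number_to_moo n w).toList = w.toList ++ ((mooGo n []).map String.toList).flatten := by
  induction k with
  | zero =>
    intro n hn w
    rw [number_to_moo, mooGo_stop _ _ (by omega)]
    simp [show ¬ n > 1 by omega]
  | succ k ih =>
    intro n hn w
    by_cases h : n > 1
    · have hb : (PySem.Int.floordiv n 2).toNat ≤ k := by
        have := pv_half_lt n h; omega
      rw [number_to_moo]
      conv_rhs => rw [mooGo]
      simp only [h, if_pos]
      rw [ih _ hb,
          mooGo_shift k (PySem.Int.floordiv n 2) hb
            ([] ++ [if PySem.Int.mod n 2 = 1 then "m" else "o"])]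
      have hm : n % 2 = 0 ∨ n % 2 = 1 := by omega
      rcases hm with hm | hm
      · simp [hm, String.toList_append]
      · simp [hm, String.toList_append]
    · rw [number_to_moo, mooGo_stop _ _ h]
      simp [h]

theorem number_to_moo_spec : Claim_equal_number_to_moo := by
  intro n w _
  unfold Spec_number_to_moo number_to_moo_alt
  refine String.toList_inj.mp ?_
  rw [moo_eq_toList n.toNat n (le_refl _) w]
  simp [PySem.Str.toList_join, join_nil_flatten]
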